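-- pv_equiv track=rewrite | github.com/stanfordnmbl/opencap-processing | OMA_OpenCapPipeline/processing.py | get_interval_indices
-- ===== SOURCE A (Python) =====
-- def get_interval_indices(times, start_time, end_time):
--     start_time_index = -1
--     end_time_index = -1
--     for i in range(len(times)):
--         if start_time <= times[i] and start_time_index == -1:
--             start_time_index = i
--         if end_time <= times[i] and end_time_index == -1:
--             end_time_index = i
--
--     if start_time_index == -1:
--         start_time_index = len(times) - 1
--     if end_time_index == -1:
--         end_time_index = len(times) - 1
--
--     return start_time_index, end_time_index
-- ===== SOURCE B (Python) =====
-- def get_interval_indices(times, start_time, end_time):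
--     # Divide and conquer: first index in seg (at global offset off) whose
--     # value is >= t, preferring the left half; None if no such index.
--     def first_ge(t, seg, off):
--         if not seg:
--             return None
--         if len(seg) == 1:
--             return off if t <= seg[0] else None
--         m = len(seg) // 2
--         left = first_ge(t, seg[:m], off)
--         return left if left is not None else first_ge(t, seg[m:], off + m)
--
--     n = len(times)
--     i = first_ge(start_time, times, 0)
--     j = first_ge(end_time, times, 0)
--     return (i if i is not None else n - 1, j if j is not None else n - 1)
-- ===== Notes on version B (the rewrite author's own statement) =====
-- stated objective: alternative
-- what changed: Replaces A's single forward loop threading two -1 sentinel accumulators (plus post-loop fixups) with a divide-and-conquer recursion that splits the list in half and returns the first qualifying index of the left half if any, else of the right half, applied once per threshold; correct because the leftmost index with t <= times[i] lies in the left half iff the left half contains any such index.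
import Mathlib
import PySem

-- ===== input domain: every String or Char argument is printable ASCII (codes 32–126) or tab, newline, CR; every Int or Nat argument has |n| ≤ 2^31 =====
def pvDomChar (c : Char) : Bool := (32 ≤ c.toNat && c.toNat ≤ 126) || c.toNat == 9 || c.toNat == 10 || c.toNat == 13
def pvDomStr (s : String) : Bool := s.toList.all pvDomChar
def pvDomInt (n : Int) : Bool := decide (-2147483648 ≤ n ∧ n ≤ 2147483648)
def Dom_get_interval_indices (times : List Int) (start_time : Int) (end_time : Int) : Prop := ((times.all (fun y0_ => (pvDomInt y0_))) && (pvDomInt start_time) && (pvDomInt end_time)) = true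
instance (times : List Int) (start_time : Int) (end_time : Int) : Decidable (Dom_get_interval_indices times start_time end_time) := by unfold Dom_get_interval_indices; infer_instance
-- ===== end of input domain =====

-- B replaces A's single forward loop with two -1 sentinel accumulators (and post-loop
-- fixups) by a divide-and-conquer recursion: split the list in half, return the first
-- qualifying index of the left half if any, else of the right half; applied per threshold.
-- Python A returns a 2-tuple; per the task signature both ports return it as a 2-element list.

-- ===== PORT A =====
-- the for loop of A: index i, state (start_time_index, end_time_index)
def pvLoopA (start_time end_time : Int) : List Int → Int → Int × Int → Int × Int
  | [], _, st => st
  | x :: xs, i, (si, ei) =>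
      pvLoopA start_time end_time xs (i + 1)
        ((if start_time ≤ x ∧ si = -1 then i else si),
         (if end_time ≤ x ∧ ei = -1 then i else ei))

def get_interval_indices (times : List Int) (start_time : Int) (end_time : Int) : List Int :=
  let st := pvLoopA start_time end_time times 0 (-1, -1)
  let si := if st.1 = -1 then (times.length : Int) - 1 else st.1
  let ei := if st.2 = -1 then (times.length : Int) - 1 else st.2
  [si, ei]

-- ===== PORT B =====
-- divide and conquer: first index in seg (at global offset off) with t ≤ value, left half preferred
def pvFirstGe (t : Int) : (seg : List Int) → Int → Option Int
  | [], _ => none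
  | [x], off => if t ≤ x then some off else none
  | x :: y :: rest, off =>
      let m := (x :: y :: rest).length / 2
      match pvFirstGe t ((x :: y :: rest).take m) off with
      | some r => some r
      | none => pvFirstGe t ((x :: y :: rest).drop m) (off + (m : Int))
  termination_by seg _ => seg.length
  decreasing_by all_goals (simp; omega)

def get_interval_indices_alt (times : List Int) (start_time : Int) (end_time : Int) : List Int :=
  let n : Int := times.length
  let i := pvFirstGe start_time times 0
  let j := pvFirstGe end_time times 0
  [(match i with | some v => v | none => n - 1),
   (match j with | some v => v | none => n - 1)]

-- ===== PRECONDITION & SPEC =====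
def Spec_get_interval_indices (times : List Int) (start_time : Int) (end_time : Int) (out : List Int) : Prop := out = get_interval_indices_alt times start_time end_time
instance (times : List Int) (start_time : Int) (end_time : Int) (out : List Int) : Decidable (Spec_get_interval_indices times start_time end_time out) := by unfold Spec_get_interval_indices; infer_instance

-- ===== CLAIM (what is proved, stated in full; the proofs are below) =====
def Claim_equal_get_interval_indices : Prop := ∀ (times : List Int) (start_time : Int) (end_time : Int), Dom_get_interval_indices times start_time end_time → Spec_get_interval_indices times start_time end_time (get_interval_indices times start_time end_time)

-- ===== LEMMAS AND PROOFS =====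

-- linear reference search: first index (from off) whose value is ≥ t
def pvLin (t : Int) : List Int → Int → Option Int
  | [], _ => none
  | x :: xs, off => if t ≤ x then some off else pvLin t xs (off + 1)

theorem pvLin_append (t : Int) (a b : List Int) (off : Int) :
    pvLin t (a ++ b) off =
      (match pvLin t a off with
       | some r => some r
       | none => pvLin t b (off + (a.length : Int))) := by
  induction a generalizing off with
  | nil => simp [pvLin]
  | cons x xs ih =>
    by_cases h : t ≤ x
    · simp [pvLin, h]
    · have : off + 1 + (xs.length : Int) = off + ((xs.length : Nat) + 1 : Nat) := by
        push_cast; ring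
      simp [pvLin, h, ih, this]

theorem pvLin_split_some (t : Int) (L : List Int) (m : Nat) (off r : Int)
    (h : pvLin t (L.take m) off = some r) : pvLin t L off = some r := by
  conv_lhs => rw [← List.take_append_drop m L]
  rw [pvLin_append, h]

theorem pvLin_split_none (t : Int) (L : List Int) (m : Nat) (off : Int) (hm : m ≤ L.length)
    (h : pvLin t (L.take m) off = none) :
    pvLin t L off = pvLin t (L.drop m) (off + (m : Int)) := by
  conv_lhs => rw [← List.take_append_drop m L]
  rw [pvLin_append, h]
  simp [List.length_take, Nat.min_eq_left hm]

theorem pvFirstGe_eq_lin (t : Int) (seg : List Int) (off : Int) :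
    pvFirstGe t seg off = pvLin t seg off := by
  fun_induction pvFirstGe t seg off
  case case1 => rfl
  case case2 h => simp [pvLin, h]
  case case3 h => simp [pvLin, h]
  case case4 a b c o r hr ih1 =>
    rw [ih1] at hr
    exact (pvLin_split_some _ _ _ _ _ hr).symm
  case case5 a b c o hr ih1 ih2 =>
    rw [ih1] at hr
    rw [ih2]
    exact (pvLin_split_none _ _ _ _ (Nat.div_le_self _ 2) hr).symm

theorem pvLin_ge (t : Int) (xs : List Int) (i j : Int)
    (h : pvLin t xs i = some j) : i ≤ j := by
  induction xs generalizing i with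
  | nil => simp [pvLin] at h
  | cons x xs ih =>
    by_cases hx : t ≤ x
    · simp [pvLin, hx] at h; omega
    · simp [pvLin, hx] at h
      have := ih (i + 1) h
      omega

-- the two components of A's loop state evolve independently; pvLoop1 is one of them
def pvLoop1 (t : Int) : List Int → Int → Int → Int
  | [], _, c => c
  | x :: xs, i, c => pvLoop1 t xs (i + 1) (if t ≤ x ∧ c = -1 then i else c)

theorem pvLoopA_eq_loop1 (s e : Int) (xs : List Int) (i : Int) (si ei : Int) :
    pvLoopA s e xs i (si, ei) = (pvLoop1 s xs i si, pvLoop1 e xs i ei) := by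
  induction xs generalizing i si ei with
  | nil => simp [pvLoopA, pvLoop1]
  | cons x xs ih => simp [pvLoopA, pvLoop1, ih]

theorem pvLoop1_frozen (t : Int) (xs : List Int) (i c : Int) (hc : c ≠ -1) :
    pvLoop1 t xs i c = c := by
  induction xs generalizing i with
  | nil => rfl
  | cons x xs ih => simp [pvLoop1, hc]; exact ih (i + 1)

theorem pvLoop1_eq_lin (t : Int) (xs : List Int) (i : Int) (hi : 0 ≤ i) :
    pvLoop1 t xs i (-1) = (match pvLin t xs i with | some j => j | none => -1) := by
  induction xs generalizing i with
  | nil => rfl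
  | cons x xs ih =>
    by_cases h : t ≤ x
    · have hne : i ≠ -1 := by omega
      simp [pvLoop1, pvLin, h, pvLoop1_frozen t xs (i + 1) i hne]
    · simpa [pvLoop1, pvLin, h] using ih (i + 1) (by omega)

-- ===== VERDICT (by name: the statement is the Claim_ definition above) =====
theorem get_interval_indices_spec : Claim_equal_get_interval_indices := by
  intro times start_time end_time _
  unfold Spec_get_interval_indices get_interval_indices get_interval_indices_alt
  rw [pvLoopA_eq_loop1, pvLoop1_eq_lin start_time times 0 le_rfl,
      pvLoop1_eq_lin end_time times 0 le_rfl,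
      pvFirstGe_eq_lin, pvFirstGe_eq_lin]
  cases hs : pvLin start_time times 0 with
  | none =>
    cases he : pvLin end_time times 0 with
    | none => simp
    | some j =>
      have hj := pvLin_ge end_time times 0 j he
      simp; omega
  | some j =>
    have hj := pvLin_ge start_time times 0 j hs
    cases he : pvLin end_time times 0 with
    | none => simp; omega
    | some k =>
      have hk := pvLin_ge end_time times 0 k he
      simp; omega
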